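-- pv_equiv track=rewrite | github.com/cfe-lab/stocky | stocky-devel/stocky/serverlib/commlink.py | hexstr_to_str
-- ===== SOURCE A (Python) =====
-- _HEXTAB = dict([(chr(ord('0') + i), i) for i in range(0, 10)] +
--                [(chr(ord('A') + i), i+10) for i in range(0, 6)])
--
-- def hexstr_to_str(instr: str) -> str:
--     """Convert a string of hex characters into legible characters.
--
--     Depending on the RFID label being read, and the settings of the RFID reader,
--     we can receive a string containing hexadecimal characters
--     representing ASCII chars from the RFID reader when reading
--     RFID labels.
--     Here, convert these into a string of alphanumeric characters suitable
--     for human consumption.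
--     For example, the received string '4348454D3130303030000000' is coded as::
--
--       '43 48 45 4D 31 30 30 30 30 00 00 00'
--         C  H  E  M  1  0  0  0  0
--
--     where, for example, hexadecimal 43 is the ASCII character 'C'.
--     Note that this conversion is only considered successful if the leading
--     decoded character is 'human readable' , i.e. either a lower or uppercase letter or
--     a numeral.
--     If the conversion fails, return the original string.
--
--     Args:
--        instr: the raw string read from the RFID reader.
--
--     Returns:
--        The modified string upon successful conversion, otherwise
--        the original string.
--     """
--     if not instr or len(instr) % 2 == 1:
--         return instr
--     # strlst: list of strings of length two representing hex numbers.
--     strlst = [instr[i:i+2] for i in range(0, len(instr), 2)]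
--     # numlst: list of integers. if this fails, give up, as we do not have Hex numbers
--     try:
--         numlst = [_HEXTAB[hexstr[0]] * 16 + _HEXTAB[hexstr[1]] for hexstr in strlst]
--     except KeyError:
--         return instr
--     # NOTE: also return the original string if the leading char is not a 'reasonable' ASCII
--     # char.
--     testchar = chr(numlst[0])
--     charpass = 'A' <= testchar <= 'Z' or 'a' <= testchar <= 'z' or '1' <= testchar <= '9'
--     # NOTE: the string can have multiple trailing zeros...
--     return ''.join([chr(num) for num in numlst if num != 0]) if charpass else instr
-- ===== SOURCE B (Python) =====
-- _HEXDIGITS = "0123456789ABCDEF"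
--
-- def hexstr_to_str(instr: str) -> str:
--     if not instr or len(instr) % 2 == 1:
--         return instr
--     if any(c not in _HEXDIGITS for c in instr):
--         return instr
--     data = int(instr, 16).to_bytes(len(instr) // 2, 'big')
--     testchar = chr(data[0])
--     if 'A' <= testchar <= 'Z' or 'a' <= testchar <= 'z' or '1' <= testchar <= '9':
--         return ''.join(chr(b) for b in data if b != 0)
--     return instr
-- ===== Notes on version B (the rewrite author's own statement) =====
-- stated objective: alternative
-- what changed: B validates the hex charset up front and then decodes the whole string at once with a single big-integer conversion (int in base 16) split into big-endian bytes, replacing A's per-pair slicing and table-lookup loop.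
import Mathlib
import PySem

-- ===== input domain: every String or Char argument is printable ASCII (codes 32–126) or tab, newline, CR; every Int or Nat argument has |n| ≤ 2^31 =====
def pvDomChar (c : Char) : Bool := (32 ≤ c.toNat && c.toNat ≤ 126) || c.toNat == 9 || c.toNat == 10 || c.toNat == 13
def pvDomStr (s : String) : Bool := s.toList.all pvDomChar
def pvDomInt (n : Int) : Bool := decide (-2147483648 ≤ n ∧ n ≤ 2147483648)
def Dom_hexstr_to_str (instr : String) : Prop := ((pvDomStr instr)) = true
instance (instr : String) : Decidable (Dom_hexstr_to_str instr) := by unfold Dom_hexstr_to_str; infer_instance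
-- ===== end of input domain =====

-- B replaces A's per-pair slice-and-lookup loop with an up-front charset check followed by a
-- single big-integer decode split into bytes (alternative decomposition, same cost).


-- ===== PORT A =====
-- _HEXTAB built exactly as in the Python module
def pvHexTab : PySem.Dict Char Int :=
  PySem.Dict.ofList
    (((PySem.List.pyRange 0 10 1).map (fun i => (Char.ofNat ('0'.toNat + i.toNat), i))) ++
     ((PySem.List.pyRange 0 6 1).map (fun i => (Char.ofNat ('A'.toNat + i.toNat), i + 10))))

-- one element of A's numlst comprehension: _HEXTAB[h[0]] * 16 + _HEXTAB[h[1]], none = KeyError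
def pvDecodePair (h : List Char) : Option Int :=
  match PySem.List.pyGet? h 0 with
  | none => none
  | some c0 =>
    match pvHexTab.get? c0 with
    | none => none
    | some a =>
      match PySem.List.pyGet? h 1 with
      | none => none
      | some c1 =>
        match pvHexTab.get? c1 with
        | none => none
        | some b => some (a * 16 + b)

def hexstr_to_str (instr : String) : String :=
  let cs := instr.toList
  if cs.isEmpty || cs.length % 2 == 1 then instr
  else
    let strlst := (PySem.List.pyRange 0 (cs.length : Int) 2).map
        (fun i => PySem.List.slice cs (some i) (some (i + 2)))
    match strlst.mapM pvDecodePair with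
    | none => instr
    | some numlst =>
      let testchar := Char.ofNat (PySem.List.pyGetD numlst 0 0).toNat
      if ('A' ≤ testchar ∧ testchar ≤ 'Z') ∨ ('a' ≤ testchar ∧ testchar ≤ 'z') ∨
         ('1' ≤ testchar ∧ testchar ≤ '9')
      then String.ofList ((numlst.filter (fun n => n != 0)).map (fun n => Char.ofNat n.toNat))
      else instr

-- ===== PORT B =====
def pvHexDigits : List Char := "0123456789ABCDEF".toList

-- hand port of the value of a single hex digit (used by the hand port of int(instr, 16);
-- exact on the validated uppercase-hex charset)
def pvHv (c : Char) : Option Int :=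
  match c with
  | '0' => some 0 | '1' => some 1 | '2' => some 2 | '3' => some 3 | '4' => some 4
  | '5' => some 5 | '6' => some 6 | '7' => some 7 | '8' => some 8 | '9' => some 9
  | 'A' => some 10 | 'B' => some 11 | 'C' => some 12 | 'D' => some 13 | 'E' => some 14
  | 'F' => some 15 | _ => none

-- hand port of int(...).to_bytes(k, 'big'): k bytes, listed big-endian
def pvBytesBE : Int → Nat → List Int
  | _, 0 => []
  | n, k + 1 => pvBytesBE (PySem.Int.floordiv n 256) k ++ [PySem.Int.mod n 256]

def hexstr_to_str_alt (instr : String) : String :=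
  let cs := instr.toList
  if cs.isEmpty || cs.length % 2 == 1 then instr
  else if cs.any (fun c => !(pvHexDigits.contains c)) then instr
  else
    -- int(instr, 16) ported by hand as a left fold over digit values (exact: charset validated)
    let data := pvBytesBE (cs.foldl (fun acc c => 16 * acc + (pvHv c).getD 0) 0) (cs.length / 2)
    let testchar := Char.ofNat (PySem.List.pyGetD data 0 0).toNat
    if ('A' ≤ testchar ∧ testchar ≤ 'Z') ∨ ('a' ≤ testchar ∧ testchar ≤ 'z') ∨
       ('1' ≤ testchar ∧ testchar ≤ '9')
    then String.ofList ((data.filter (fun n => n != 0)).map (fun n => Char.ofNat n.toNat))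
    else instr

-- ===== PRECONDITION & SPEC =====
def Spec_hexstr_to_str (instr : String) (out : String) : Prop := out = hexstr_to_str_alt instr
instance (instr : String) (out : String) : Decidable (Spec_hexstr_to_str instr out) := by unfold Spec_hexstr_to_str; infer_instance

-- ===== CLAIM (what is proved, stated in full; the proofs are below) =====
def Claim_equal_hexstr_to_str : Prop := ∀ (instr : String), Dom_hexstr_to_str instr → Spec_hexstr_to_str instr (hexstr_to_str instr)

-- ===== LEMMAS AND PROOFS =====

-- the list of two-character pairs A slices out, as a structural recursion
def pvChunk2 : List Char → List (List Char)
  | a :: b :: rest => [a, b] :: pvChunk2 rest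
  | _ => []

-- the per-pair decode both programs are proved to compute
def pvPairDecode : List Char → List Int
  | a :: b :: rest => ((pvHv a).getD 0 * 16 + (pvHv b).getD 0) :: pvPairDecode rest
  | _ => []

theorem pvHexTab_get? (c : Char) : pvHexTab.get? c = pvHv c := by
  unfold pvHv; split
  all_goals try decide
  rename_i h0 h1 h2 h3 h4 h5 h6 h7 h8 h9 hA hB hC hD hE hF
  have hk : pvHexTab.keys = ['0','1','2','3','4','5','6','7','8','9','A','B','C','D','E','F'] := by decide
  refine (PySem.Dict.get?_eq_none_iff_not_mem_keys pvHexTab c).mpr ?_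
  rw [hk]
  simp only [List.mem_cons, List.not_mem_nil, or_false]
  rintro (h|h|h|h|h|h|h|h|h|h|h|h|h|h|h|h)
  exacts [h0 h, h1 h, h2 h, h3 h, h4 h, h5 h, h6 h, h7 h, h8 h, h9 h, hA h, hB h, hC h, hD h, hE h, hF h]

theorem pvContains_hv (c : Char) : pvHexDigits.contains c = (pvHv c).isSome := by
  unfold pvHv; split
  all_goals try decide
  rename_i h0 h1 h2 h3 h4 h5 h6 h7 h8 h9 hA hB hC hD hE hF
  have hd : pvHexDigits = ['0','1','2','3','4','5','6','7','8','9','A','B','C','D','E','F'] := by decide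
  have hmem : c ∉ pvHexDigits := by
    rw [hd]
    simp only [List.mem_cons, List.not_mem_nil, or_false]
    rintro (h|h|h|h|h|h|h|h|h|h|h|h|h|h|h|h)
    exacts [h0 h, h1 h, h2 h, h3 h, h4 h, h5 h, h6 h, h7 h, h8 h, h9 h, hA h, hB h, hC h, hD h, hE h, hF h]
  simp [List.contains_eq_mem, hmem]

theorem pvHv_bounds (c : Char) : 0 ≤ (pvHv c).getD 0 ∧ (pvHv c).getD 0 < 16 := by
  unfold pvHv; split <;> exact ⟨by decide, by decide⟩

theorem pvFoldl_shift (cs : List Char) (v : Int) :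
    cs.foldl (fun acc c => 16 * acc + (pvHv c).getD 0) v
      = v * 16 ^ cs.length + cs.foldl (fun acc c => 16 * acc + (pvHv c).getD 0) 0 := by
  induction cs generalizing v with
  | nil => simp
  | cons c cs ih =>
    simp only [List.foldl_cons, List.length_cons]
    rw [ih (16 * v + (pvHv c).getD 0), ih (16 * 0 + (pvHv c).getD 0)]
    ring

theorem pvFoldl_bounds (cs : List Char) :
    0 ≤ cs.foldl (fun acc c => 16 * acc + (pvHv c).getD 0) 0 ∧
      cs.foldl (fun acc c => 16 * acc + (pvHv c).getD 0) 0 < 16 ^ cs.length := by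
  induction cs with
  | nil => simp
  | cons c cs ih =>
    obtain ⟨h1, h2⟩ := ih
    obtain ⟨h3, h4⟩ := pvHv_bounds c
    simp only [List.foldl_cons, List.length_cons]
    rw [pvFoldl_shift]
    have hpow : (0:Int) < 16 ^ cs.length := by positivity
    constructor
    · nlinarith
    · nlinarith [pow_succ (16:Int) cs.length]

theorem pvBytesBE_split (m : Nat) (w p : Int) (hw0 : 0 ≤ w) (hw : w < 256 ^ m)
    (hp0 : 0 ≤ p) (hp : p < 256) :
    pvBytesBE (p * 256 ^ m + w) (m + 1) = p :: pvBytesBE w m := by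
  induction m generalizing w p with
  | zero =>
    norm_num at hw
    have hw' : w = 0 := by omega
    subst hw'
    simp only [pvBytesBE, pow_zero, mul_one, add_zero]
    rw [PySem.Int.mod_eq_emod_of_pos (by norm_num)]
    rw [Int.emod_eq_of_lt hp0 hp]
    rfl
  | succ m ih =>
    have h256 : (0:Int) < 256 := by norm_num
    have hpow : (0:Int) < 256 ^ m := by positivity
    show pvBytesBE (p * 256 ^ (m+1) + w) (m+1+1) = p :: pvBytesBE w (m+1)
    conv_lhs => rw [pvBytesBE]
    conv_rhs => rw [pvBytesBE]
    rw [PySem.Int.floordiv_eq_ediv_of_pos h256, PySem.Int.mod_eq_emod_of_pos h256,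
        PySem.Int.floordiv_eq_ediv_of_pos h256, PySem.Int.mod_eq_emod_of_pos h256]
    rw [show p * 256 ^ (m+1) + w = w + (p * 256 ^ m) * 256 by ring]
    rw [show (w + p * 256 ^ m * 256) / 256 = w / 256 + p * 256 ^ m by
          generalize p * 256 ^ m = P; omega]
    rw [show (w + p * 256 ^ m * 256) % 256 = w % 256 by
          generalize p * 256 ^ m = P; omega]
    have hw0' : 0 ≤ w / 256 := Int.ediv_nonneg hw0 (by norm_num)
    have hw' : w / 256 < 256 ^ m := by
      rw [Int.ediv_lt_iff_lt_mul h256]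
      calc w < 256 ^ (m+1) := hw
        _ = 256 ^ m * 256 := by ring
    rw [show w / 256 + p * 256 ^ m = p * 256 ^ m + w / 256 by ring]
    rw [ih (w / 256) p hw0' hw' hp0 hp]
    rfl

theorem pvBytesBE_foldl (m : Nat) (cs : List Char) (h : cs.length = 2 * m) :
    pvBytesBE (cs.foldl (fun acc c => 16 * acc + (pvHv c).getD 0) 0) m = pvPairDecode cs := by
  induction m generalizing cs with
  | zero =>
    have : cs = [] := by
      cases cs with
      | nil => rfl
      | cons a t => simp at h
    subst this
    rfl
  | succ m ih =>
    match cs, h with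
    | a :: b :: rest, h =>
      have hr : rest.length = 2 * m := by simp at h; omega
      simp only [List.foldl_cons]
      rw [pvFoldl_shift, hr]
      have hpw : (16:Int) ^ (2 * m) = 256 ^ m := by rw [pow_mul]; norm_num
      rw [hpw]
      obtain ⟨hw0, hw⟩ := pvFoldl_bounds rest
      rw [hr, hpw] at hw
      obtain ⟨ha0, ha⟩ := pvHv_bounds a
      obtain ⟨hb0, hb⟩ := pvHv_bounds b
      rw [pvBytesBE_split m _ _ hw0 hw (by omega) (by omega)]
      rw [ih rest hr]
      simp only [pvPairDecode]
      congr 1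
      ring

theorem pvSliceShift (xs : List Char) (a b : Char) (k : Nat) :
    PySem.List.slice (a :: b :: xs) (some (2 * ((k:Int) + 1))) (some (2 * ((k:Int) + 1) + 2))
      = PySem.List.slice xs (some (2 * (k:Int))) (some (2 * (k:Int) + 2)) := by
  rw [show 2 * ((k:Int) + 1) = ((2*k+2 : Nat) : Int) by push_cast; ring,
      show ((2*k+2 : Nat) : Int) + 2 = ((2*k+4 : Nat) : Int) by push_cast; ring,
      show 2 * (k:Int) = ((2*k : Nat) : Int) by push_cast; ring,
      show ((2*k : Nat) : Int) + 2 = ((2*k+2 : Nat) : Int) by push_cast; ring]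
  rw [PySem.List.slice_natCast, PySem.List.slice_natCast]
  rw [show 2*k+2 = (2*k)+1+1 by omega]
  simp only [List.drop_succ_cons]
  congr 1
  omega

theorem pvMapSlice (m : Nat) (cs : List Char) (h : cs.length = 2 * m) :
    (List.range m).map (fun (k : Nat) => PySem.List.slice cs (some (2 * (k:Int))) (some (2 * (k:Int) + 2)))
      = pvChunk2 cs := by
  induction m generalizing cs with
  | zero =>
    rw [List.eq_nil_of_length_eq_zero h]
    rfl
  | succ m ih =>
    match cs, h with
    | a :: b :: rest, h =>
      have hr : rest.length = 2 * m := by simp at h; omega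
      rw [List.range_succ_eq_map, List.map_cons, List.map_map]
      have hhead : PySem.List.slice (a :: b :: rest) (some (2 * ((0:Nat):Int))) (some (2 * ((0:Nat):Int) + 2)) = [a, b] := by
        rw [show (2 * ((0:Nat):Int)) = ((0:Nat):Int) by norm_num,
            show ((0:Nat):Int) + 2 = ((2:Nat):Int) by norm_num,
            PySem.List.slice_natCast]
        rfl
      rw [hhead]
      have htail : (List.range m).map
          ((fun (k : Nat) => PySem.List.slice (a :: b :: rest) (some (2 * (k:Int))) (some (2 * (k:Int) + 2))) ∘ Nat.succ)
            = (List.range m).map (fun (k : Nat) => PySem.List.slice rest (some (2 * (k:Int))) (some (2 * (k:Int) + 2))) := by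
        refine List.map_congr_left (fun k _ => ?_)
        show PySem.List.slice (a :: b :: rest) (some (2 * ((k+1 : Nat):Int))) (some (2 * ((k+1 : Nat):Int) + 2)) = _
        rw [show ((k+1 : Nat):Int) = (k:Int) + 1 by push_cast; ring]
        exact pvSliceShift rest a b k
      rw [htail, ih rest hr]
      rfl

theorem pvStrlst_eq (m : Nat) (cs : List Char) (h : cs.length = 2 * m) :
    (PySem.List.pyRange 0 (cs.length : Int) 2).map
        (fun i => PySem.List.slice cs (some i) (some (i + 2))) = pvChunk2 cs := by
  rw [h, PySem.List.pyRange_of_pos _ _ (by norm_num : (0:Int) < 2)]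
  have hcount : (if (0:Int) < ((2*m : Nat) : Int) then ((((2*m:Nat):Int) - 0 + 2 - 1) / 2).toNat else 0) = m := by
    split_ifs <;> omega
  rw [hcount, List.map_map]
  rw [show ((fun i => PySem.List.slice cs (some i) (some (i + 2))) ∘ (fun k : Nat => (0:Int) + 2 * (k:Int)))
        = (fun (k : Nat) => PySem.List.slice cs (some (2 * (k:Int))) (some (2 * (k:Int) + 2))) from
      funext (fun k => by norm_num)]
  exact pvMapSlice m cs h

theorem pvDecodePair_pair (a b : Char) :
    pvDecodePair [a, b]
      = match pvHv a with
        | none => none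
        | some x => match pvHv b with
          | none => none
          | some y => some (x * 16 + y) := by
  unfold pvDecodePair
  rw [show PySem.List.pyGet? [a, b] 0 = some a from PySem.List.pyGet?_zero_cons a [b]]
  dsimp only
  rw [pvHexTab_get?]
  cases pvHv a with
  | none => rfl
  | some x =>
    dsimp only
    rw [show PySem.List.pyGet? [a, b] 1 = some b by
          simp [PySem.List.pyGet?, PySem.List.pyIdx?]]
    dsimp only
    rw [pvHexTab_get?]

theorem pvMapM_chunk2 (m : Nat) (cs : List Char) (h : cs.length = 2 * m) :
    (pvChunk2 cs).mapM pvDecodePair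
      = if cs.all (fun c => (pvHv c).isSome) then some (pvPairDecode cs) else none := by
  induction m generalizing cs with
  | zero =>
    rw [List.eq_nil_of_length_eq_zero h]
    rfl
  | succ m ih =>
    match cs, h with
    | a :: b :: rest, h =>
      have hr : rest.length = 2 * m := by simp at h; omega
      simp only [pvChunk2, List.mapM_cons, pvDecodePair_pair, ih rest hr]
      cases hva : pvHv a with
      | none => simp [List.all_cons, hva]
      | some x =>
        cases hvb : pvHv b with
        | none => simp [List.all_cons, hva, hvb]
        | some y =>
          by_cases hall : rest.all (fun c => (pvHv c).isSome) = true
          · simp [List.all_cons, hva, hvb, hall, pvPairDecode]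
          · simp [List.all_cons, hva, hvb, hall]

-- ===== VERDICT (by name: the statement is the Claim_ definition above) =====
theorem hexstr_to_str_spec : Claim_equal_hexstr_to_str := by
  unfold Claim_equal_hexstr_to_str
  intro instr _
  unfold Spec_hexstr_to_str hexstr_to_str hexstr_to_str_alt
  simp only []
  by_cases hg : (instr.toList.isEmpty || instr.toList.length % 2 == 1) = true
  · rw [if_pos hg, if_pos hg]
  · rw [if_neg hg, if_neg hg]
    have hev : instr.toList.length % 2 = 0 := by
      simp only [Bool.or_eq_true, beq_iff_eq] at hg
      omega
    obtain ⟨m, hm⟩ : ∃ m, instr.toList.length = 2 * m := ⟨instr.toList.length / 2, by omega⟩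
    rw [pvStrlst_eq m instr.toList hm, pvMapM_chunk2 m instr.toList hm]
    by_cases hall : instr.toList.all (fun c => (pvHv c).isSome) = true
    · rw [if_pos hall]
      have hany : (instr.toList.any fun c => !pvHexDigits.contains c) = false := by
        simp only [pvContains_hv]
        simp only [List.all_eq_true] at hall
        simp only [List.any_eq_false]
        intro c hc
        simp [hall c hc]
      rw [hany]
      simp only [Bool.false_eq_true, if_false]
      rw [hm, show (2 * m) / 2 = m by omega, pvBytesBE_foldl m instr.toList hm]
    · rw [if_neg hall]
      have hany : (instr.toList.any fun c => !pvHexDigits.contains c) = true := by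
        simp only [pvContains_hv]
        simp only [List.all_eq_true, not_forall] at hall
        simp only [List.any_eq_true]
        obtain ⟨c, hc, hns⟩ := hall
        exact ⟨c, hc, by simpa using hns⟩
      rw [hany]
      rw [if_pos rfl]
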